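-- pv_equiv track=rewrite | github.com/2833844911/cyCronet | cycronet-build/python/cycronet/__init__.py | _sort_headers_dict
-- ===== SOURCE A (Python) =====
-- from typing import Optional, Union, Dict, List, Tuple, Any
--
-- BROWSER_HEADER_ORDER = [
--     "host", "connection", "cache-control", "sec-ch-ua", "sec-ch-ua-mobile",
--     "sec-ch-ua-platform", "upgrade-insecure-requests", "user-agent", "accept",
--     "sec-fetch-site", "sec-fetch-mode", "sec-fetch-user", "sec-fetch-dest",
--     "referer", "accept-encoding", "accept-language", "cookie", "priority",
-- ]
--
-- def _sort_headers_dict(headers_dict: Dict[str, str]) -> List[Tuple[str, str]]: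
--     """将字典 headers 按浏览器顺序排序"""
--     header_dict_lower = {k.lower(): (k, v) for k, v in headers_dict.items()}
--     sorted_headers = []
--
--     for key in BROWSER_HEADER_ORDER:
--         if key in header_dict_lower:
--             sorted_headers.append(header_dict_lower[key])
--             del header_dict_lower[key]
--
--     for original_key, value in header_dict_lower.values():
--         sorted_headers.append((original_key, value))
--
--     return sorted_headers
-- ===== SOURCE B (Python) =====
-- from typing import Dict, List, Tuple
--
-- BROWSER_HEADER_ORDER = [
--     "host", "connection", "cache-control", "sec-ch-ua", "sec-ch-ua-mobile",
--     "sec-ch-ua-platform", "upgrade-insecure-requests", "user-agent", "accept",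
--     "sec-fetch-site", "sec-fetch-mode", "sec-fetch-user", "sec-fetch-dest",
--     "referer", "accept-encoding", "accept-language", "cookie", "priority",
-- ]
--
-- _RANK = {h: i for i, h in enumerate(BROWSER_HEADER_ORDER)}
--
-- def _sort_headers_dict(headers_dict: Dict[str, str]) -> List[Tuple[str, str]]:
--     """Rank every header once and sort globally; stable sort keeps unknown
--     headers in first-occurrence order."""
--     lower = {k.lower(): (k, v) for k, v in headers_dict.items()}
--     n = len(BROWSER_HEADER_ORDER)
--     return sorted(lower.values(), key=lambda kv: _RANK.get(kv[0].lower(), n))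
-- ===== Notes on version B (the rewrite author's own statement) =====
-- stated objective: idiomatic
-- what changed: Replaces the two-phase 'walk the preferred order pulling matches out of the dict, then append the leftovers' loop with a precomputed rank table and one global stable sort of the lowercased dict's values keyed by rank (unknown headers get the sentinel rank len(order) and stay in first-occurrence order).
import Mathlib
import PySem

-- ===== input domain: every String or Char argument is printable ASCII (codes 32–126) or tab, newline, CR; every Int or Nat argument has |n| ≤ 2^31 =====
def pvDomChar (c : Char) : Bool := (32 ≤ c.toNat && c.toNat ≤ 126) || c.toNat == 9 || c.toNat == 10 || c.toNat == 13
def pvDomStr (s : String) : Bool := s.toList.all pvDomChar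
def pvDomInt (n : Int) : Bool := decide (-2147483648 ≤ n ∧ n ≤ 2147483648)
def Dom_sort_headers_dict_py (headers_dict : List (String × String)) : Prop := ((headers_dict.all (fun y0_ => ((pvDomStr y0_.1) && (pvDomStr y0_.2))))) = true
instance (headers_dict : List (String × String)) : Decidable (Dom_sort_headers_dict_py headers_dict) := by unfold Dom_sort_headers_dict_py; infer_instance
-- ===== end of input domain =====

-- B replaces A's two-phase extract-then-append loops by one stable sort under a precomputed rank table (idiomatic; same results).

-- ===== PORT A =====
def pvBrowserHeaderOrder : List String :=
  ["host", "connection", "cache-control", "sec-ch-ua", "sec-ch-ua-mobile",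
   "sec-ch-ua-platform", "upgrade-insecure-requests", "user-agent", "accept",
   "sec-fetch-site", "sec-fetch-mode", "sec-fetch-user", "sec-fetch-dest",
   "referer", "accept-encoding", "accept-language", "cookie", "priority"]

def sort_headers_dict_py (headers_dict : List (String × String)) : List (String × String) :=
  -- header_dict_lower = {k.lower(): (k, v) for k, v in headers_dict.items()}
  let header_dict_lower : PySem.Dict String (String × String) :=
    headers_dict.foldl (fun d kv => d.insert (PySem.Str.lower kv.1) (kv.1, kv.2)) PySem.Dict.empty
  -- for key in BROWSER_HEADER_ORDER: if key in d: append(d[key]); del d[key]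
  let st := pvBrowserHeaderOrder.foldl
    (fun (st : List (String × String) × PySem.Dict String (String × String)) key =>
      match st.2.get? key with
      | some p => (st.1 ++ [p], st.2.erase key)
      | none => st)
    ([], header_dict_lower)
  -- for original_key, value in d.values(): append((original_key, value))
  st.2.values.foldl (fun acc kv => acc ++ [(kv.1, kv.2)]) st.1

-- ===== PORT B =====
-- _RANK = {h: i for i, h in enumerate(BROWSER_HEADER_ORDER)}
def pvRank : PySem.Dict String Int :=
  (PySem.List.enumerate pvBrowserHeaderOrder 0).foldl
    (fun d ih => d.insert ih.2 ih.1) PySem.Dict.empty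

def sort_headers_dict_py_alt (headers_dict : List (String × String)) : List (String × String) :=
  let lower : PySem.Dict String (String × String) :=
    headers_dict.foldl (fun d kv => d.insert (PySem.Str.lower kv.1) (kv.1, kv.2)) PySem.Dict.empty
  let n : Int := (pvBrowserHeaderOrder.length : Int)
  PySem.List.sorted lower.values (fun kv => pvRank.getD (PySem.Str.lower kv.1) n) false

-- ===== PRECONDITION & SPEC =====
def Spec_sort_headers_dict_py (headers_dict : List (String × String)) (out : List (String × String)) : Prop := out = sort_headers_dict_py_alt headers_dict
instance (headers_dict : List (String × String)) (out : List (String × String)) : Decidable (Spec_sort_headers_dict_py headers_dict out) := by unfold Spec_sort_headers_dict_py; infer_instance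

-- ===== CLAIM (what is proved, stated in full; the proofs are below) =====
def Claim_equal_sort_headers_dict_py : Prop := ∀ (headers_dict : List (String × String)), Dom_sort_headers_dict_py headers_dict → Spec_sort_headers_dict_py headers_dict (sort_headers_dict_py headers_dict)

-- ===== LEMMAS AND PROOFS =====

theorem insertBy_append_left {α : Type} (before : α → α → Bool) (x : α) (as bs : List α)
    (h : ∀ a ∈ as, before x a = false) :
    PySem.List.insertBy before x (as ++ bs) = as ++ PySem.List.insertBy before x bs := by
  induction as with
  | nil => simp
  | cons a as ih =>
    simp only [List.cons_append, PySem.List.insertBy, h a (by simp)]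
    simp [ih (fun a ha => h a (by simp [ha]))]

theorem insertBy_all_before {α : Type} (before : α → α → Bool) (x : α) (bs : List α)
    (h : ∀ b ∈ bs, before x b = true) :
    PySem.List.insertBy before x bs = x :: bs := by
  cases bs with
  | nil => simp [PySem.List.insertBy]
  | cons b bs => simp [PySem.List.insertBy, h b (by simp)]

theorem lookup_filter {ν : Type} (l : List (String × ν)) (hnd : (l.map Prod.fst).Nodup) (k : String) :
    (l.filter (fun p => p.1 == k)).map (·.2) = ((l.find? (fun p => p.1 == k)).map (·.2)).toList := by
  induction l with
  | nil => simp
  | cons p l ih =>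
    simp only [List.map_cons, List.nodup_cons] at hnd
    by_cases hp : p.1 = k
    · have : l.filter (fun q => q.1 == k) = [] := by
        apply List.filter_eq_nil_iff.2
        intro q hq
        simp only [beq_iff_eq]
        intro hqk
        apply hnd.1
        rw [hp, ← hqk]
        exact List.mem_map_of_mem hq
      simp [hp, this]
    · simp [hp, ih hnd.2]

theorem get?_fold_enum (l : List String) (s : String) (hl : l.Nodup) (n : Int)
    (d : PySem.Dict String Int) :
    ((PySem.List.enumerate l n).foldl (fun d ih => d.insert ih.2 ih.1) d).get? s =
      if s ∈ l then some (n + (l.idxOf s : Int)) else d.get? s := by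
  induction l generalizing n d with
  | nil => simp
  | cons x l ih =>
    simp only [PySem.List.enumerate_cons, List.foldl_cons, List.nodup_cons] at *
    rw [ih hl.2]
    by_cases hx : s = x
    · subst hx
      have : s ∉ l := hl.1
      simp [this, PySem.Dict.get?_insert_self]
    · by_cases hm : s ∈ l
      · simp only [List.mem_cons, hm, if_true, hx, or_true, List.idxOf_cons]
        have : (x == s) = false := by simp [Ne.symm hx]
        simp [this]
        ring
      · simp [hm, hx, PySem.Dict.get?_insert_of_ne _ _ hx]

theorem pvOrder_nodup : pvBrowserHeaderOrder.Nodup := by decide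

theorem pvRank_getD (s : String) :
    pvRank.getD s (pvBrowserHeaderOrder.length : Int) = (pvBrowserHeaderOrder.idxOf s : Int) := by
  rw [pvRank, PySem.Dict.getD, get?_fold_enum _ _ pvOrder_nodup]
  by_cases hm : s ∈ pvBrowserHeaderOrder
  · simp [hm]
  · simp [hm, PySem.Dict.get?_empty]

theorem sorted_eq_flatMap_filter {α κ : Type} [LinearOrder κ] (xs : List α) (key : α → κ)
    (rs : List κ) (hrs : rs.Pairwise (· < ·)) (hcov : ∀ x ∈ xs, key x ∈ rs) :
    PySem.List.sorted xs key false = rs.flatMap (fun r => xs.filter (fun x => decide (key x = r))) := by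
  induction xs using List.reverseRecOn with
  | nil =>
    have h1 : PySem.List.sorted ([] : List α) key false = [] := rfl
    rw [h1]
    symm
    rw [List.flatMap_eq_nil_iff]
    intro r _
    simp
  | append_singleton ys x ih =>
    have hcov' : ∀ y ∈ ys, key y ∈ rs := fun y hy => hcov y (by simp [hy])
    have hstep : PySem.List.sorted (ys ++ [x]) key false
        = PySem.List.insertBy (fun a b => decide (key a < key b)) x (PySem.List.sorted ys key false) := by
      rw [PySem.List.sorted_eq_foldl_insertBy, PySem.List.sorted_eq_foldl_insertBy, List.foldl_append]
      rfl
    rw [hstep, ih hcov']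
    obtain ⟨rs1, rs2, hsplit⟩ := List.append_of_mem (hcov x (by simp))
    subst hsplit
    have hpw := hrs
    rw [List.pairwise_append] at hpw
    have h1lt : ∀ r ∈ rs1, r < key x := fun r hr => hpw.2.2 r hr (key x) (by simp)
    have h2gt : ∀ r ∈ rs2, key x < r := fun r hr => (List.pairwise_cons.1 hpw.2.1).1 r hr
    set G := fun r => ys.filter (fun y => decide (key y = r)) with hG
    have hflat : (rs1 ++ key x :: rs2).flatMap G
        = (rs1.flatMap G ++ G (key x)) ++ rs2.flatMap G := by
      simp [List.flatMap_append]
    have hAs : ∀ a ∈ rs1.flatMap G ++ G (key x),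
        (fun a b => decide (key a < key b)) x a = false := by
      intro a ha
      simp only [List.mem_append, List.mem_flatMap, hG, List.mem_filter] at ha
      rcases ha with ⟨r, hr, _, hka⟩ | ⟨_, hka⟩ <;> simp only [decide_eq_true_eq] at hka
      · simp [hka, not_lt.2 (le_of_lt (h1lt r hr))]
      · simp [hka]
    have hBs : ∀ b ∈ rs2.flatMap G, (fun a b => decide (key a < key b)) x b = true := by
      intro b hb
      simp only [List.mem_flatMap, hG, List.mem_filter] at hb
      obtain ⟨r, hr, _, hkb⟩ := hb
      simp only [decide_eq_true_eq] at hkb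
      simp [hkb, h2gt r hr]
    rw [hflat, insertBy_append_left _ _ _ _ hAs, insertBy_all_before _ _ _ hBs]
    have hfilt : ∀ r, (ys ++ [x]).filter (fun y => decide (key y = r))
        = G r ++ (if key x = r then [x] else []) := by
      intro r
      simp only [hG, List.filter_append, List.filter_cons, List.filter_nil]
      split_ifs with h h' <;> simp_all
    have h1 : rs1.flatMap (fun r => (ys ++ [x]).filter (fun y => decide (key y = r)))
        = rs1.flatMap G := by
      apply List.flatMap_congr
      intro r hr
      rw [hfilt r, if_neg (ne_of_gt (h1lt r hr))]
      simp
    have h2 : rs2.flatMap (fun r => (ys ++ [x]).filter (fun y => decide (key y = r)))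
        = rs2.flatMap G := by
      apply List.flatMap_congr
      intro r hr
      rw [hfilt r, if_neg (ne_of_lt (h2gt r hr))]
      simp
    rw [List.flatMap_append, List.flatMap_cons, h1, h2, hfilt (key x), if_pos rfl]
    simp

theorem find?_filter_ne (l : List (String × (String × String))) (k x : String) (hne : x ≠ k) :
    (l.filter (fun p => !(p.1 == k))).find? (fun p => p.1 == x) = l.find? (fun p => p.1 == x) := by
  induction l with
  | nil => simp
  | cons p l ih =>
    by_cases hp : p.1 = k
    · have hx : (p.1 == x) = false := by simp [hp, Ne.symm hne]
      rw [List.filter_cons_of_neg (by simp [hp]), List.find?_cons_of_neg (by simp [hx]), ih]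
    · rw [List.filter_cons_of_pos (by simp [hp])]
      by_cases hx : p.1 = x
      · rw [List.find?_cons_of_pos (by simp [hx]), List.find?_cons_of_pos (by simp [hx])]
      · rw [List.find?_cons_of_neg (by simp [hx]), List.find?_cons_of_neg (by simp [hx]), ih]

theorem loopA (ks : List String) (hks : ks.Nodup) (acc : List (String × String))
    (d : PySem.Dict String (String × String)) :
    ks.foldl
      (fun (st : List (String × String) × PySem.Dict String (String × String)) key =>
        match st.2.get? key with
        | some p => (st.1 ++ [p], st.2.erase key)
        | none => st)
      (acc, d)
    = (acc ++ ks.filterMap d.get?,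
       PySem.Dict.mk (d.items.filter (fun p => decide (p.1 ∉ ks)))) := by
  induction ks generalizing acc d with
  | nil =>
    simp only [List.foldl_nil, List.filterMap_nil, List.append_nil, List.not_mem_nil,
      not_false_eq_true, decide_true, List.filter_true]
  | cons k ks ih =>
    simp only [List.nodup_cons] at hks
    simp only [List.foldl_cons]
    cases hg : d.get? k with
    | none =>
      rw [ih hks.2 acc d]
      have hfind : d.items.find? (fun p => p.1 == k) = none := by
        simpa [PySem.Dict.get?, Option.map_eq_none_iff] using hg
      have hnok : ∀ p ∈ d.items, (p.1 == k) = false := by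
        intro p hp
        have := List.find?_eq_none.1 hfind p hp
        simpa using this
      have hfm : ks.filterMap d.get? = (k :: ks).filterMap d.get? := by
        rw [List.filterMap_cons_none hg]
      have hfl : d.items.filter (fun p => decide (p.1 ∉ ks))
          = d.items.filter (fun p => decide (p.1 ∉ k :: ks)) := by
        apply List.filter_congr
        intro p hp
        have h1 : p.1 ≠ k := by simpa using hnok p hp
        simp [h1]
      rw [hfm, hfl]
    | some v =>
      rw [ih hks.2 (acc ++ [v]) (d.erase k)]
      have hget : ∀ x ∈ ks, (d.erase k).get? x = d.get? x := by
        intro x hx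
        have hne : x ≠ k := fun h => hks.1 (h ▸ hx)
        simp [PySem.Dict.get?, PySem.Dict.erase, find?_filter_ne _ _ _ hne]
      congr 1
      · rw [List.filterMap_cons_some hg, List.filterMap_congr (fun x hx => hget x hx)]
        simp
      · congr 1
        simp only [PySem.Dict.erase, List.filter_filter]
        apply List.filter_congr
        intro p hp
        by_cases h1 : p.1 = k <;> by_cases h2 : p.1 ∈ ks <;> simp [h1, h2]

theorem assemble (ks : List String) (hnd : ks.Nodup) (l : List (String × (String × String)))
    (hl : (l.map Prod.fst).Nodup) :
    (List.range ks.length).flatMap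
        (fun i => (l.filter (fun p => decide (List.idxOf p.1 ks = i))).map (·.2))
      = ks.filterMap (PySem.Dict.mk l).get? := by
  induction ks using List.reverseRecOn with
  | nil => simp
  | append_singleton ks k ih =>
    have hnd' : ks.Nodup := hnd.sublist (by simp)
    have hkn : k ∉ ks := by
      have := List.pairwise_append.1 hnd
      intro hk
      exact this.2.2 k hk k (by simp) rfl
    rw [List.length_append, List.length_singleton, List.range_succ, List.flatMap_append,
      List.filterMap_append]
    congr 1
    · rw [← ih hnd']
      apply List.flatMap_congr
      intro i hi
      have hi' : i < ks.length := List.mem_range.1 hi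
      congr 1
      apply List.filter_congr
      intro p _
      by_cases hm : p.1 ∈ ks
      · rw [List.idxOf_append]
        simp [hm]
      · rw [List.idxOf_append]
        have h1 : List.idxOf p.1 ks = ks.length := List.idxOf_eq_length_iff.2 hm
        have h2 : List.idxOf p.1 [k] + ks.length ≠ i := by omega
        simp [hm, h2, Nat.ne_of_gt hi']
    · have hfk : l.filter (fun p => decide (List.idxOf p.1 (ks ++ [k]) = ks.length))
          = l.filter (fun p => p.1 == k) := by
        apply List.filter_congr
        intro p _
        by_cases hp : p.1 = k
        · subst hp
          rw [List.idxOf_append]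
          simp [hkn]
        · by_cases hm : p.1 ∈ ks
          · rw [List.idxOf_append]
            have := List.idxOf_lt_length_iff.2 hm
            simp [hm, hp, Nat.ne_of_lt this]
          · rw [List.idxOf_append]
            have h1 : List.idxOf p.1 [k] = 1 := by
              simp [hp]
            simp [hm, hp]
      rw [List.flatMap_singleton, hfk, lookup_filter l hl k]
      have : (PySem.Dict.mk l).get? k = (l.find? (fun p => p.1 == k)).map (·.2) := rfl
      cases hf : l.find? (fun p => p.1 == k) <;> simp [this, hf]

-- every item of the lowercased dict stores the lowercase of its value's original key
theorem inv_lower (l : List (String × String)) (d : PySem.Dict String (String × String))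
    (h : ∀ p ∈ d.items, p.1 = PySem.Str.lower p.2.1) :
    ∀ p ∈ (l.foldl (fun d kv => d.insert (PySem.Str.lower kv.1) (kv.1, kv.2)) d).items,
      p.1 = PySem.Str.lower p.2.1 := by
  induction l generalizing d with
  | nil => exact h
  | cons kv l ih =>
    simp only [List.foldl_cons]
    apply ih
    intro p hp
    rw [PySem.Dict.mem_items_insert] at hp
    rcases hp with hp | hp
    · rw [hp]
    · exact h p hp.1

-- ===== VERDICT (by name: the statement is the Claim_ definition above) =====
theorem sort_headers_dict_py_spec : Claim_equal_sort_headers_dict_py := by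
  intro headers _
  unfold Spec_sort_headers_dict_py
  simp only [sort_headers_dict_py, sort_headers_dict_py_alt]
  set d := headers.foldl (fun d kv => d.insert (PySem.Str.lower kv.1) (kv.1, kv.2))
      PySem.Dict.empty with hd
  have hkeys : (d.items.map Prod.fst).Nodup := by
    have := PySem.Dict.nodup_keys_foldl_insert_key headers
      (fun kv : String × String => PySem.Str.lower kv.1)
      (fun _ kv => (kv.1, kv.2)) PySem.Dict.empty PySem.Dict.nodup_keys_empty
    simpa [PySem.Dict.keys, hd] using this
  have hinv : ∀ p ∈ d.items, p.1 = PySem.Str.lower p.2.1 :=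
    inv_lower headers PySem.Dict.empty (by intro p hp; simp [PySem.Dict.empty] at hp)
  -- A side: characterise the two loops
  rw [loopA pvBrowserHeaderOrder pvOrder_nodup [] d]
  simp only [Prod.mk.eta, List.nil_append]
  rw [PySem.List.foldl_append_singleton]
  -- B side: the rank key is the index in the order list
  have hKey : (fun kv : String × String =>
        pvRank.getD (PySem.Str.lower kv.1) (pvBrowserHeaderOrder.length : Int))
      = fun kv : String × String =>
        ((pvBrowserHeaderOrder.idxOf (PySem.Str.lower kv.1) : Nat) : Int) :=
    funext fun kv => pvRank_getD _
  rw [hKey]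
  rw [sorted_eq_flatMap_filter d.values _
      ((List.range (pvBrowserHeaderOrder.length + 1)).map (fun i : Nat => (i : Int)))
      (List.pairwise_lt_range.map _ (by intro a b h; exact_mod_cast h))
      (fun x _ => List.mem_map.2 ⟨pvBrowserHeaderOrder.idxOf (PySem.Str.lower x.1),
        List.mem_range.2 (Nat.lt_succ_of_le List.idxOf_le_length), rfl⟩)]
  rw [List.flatMap_map]
  have hgrp : ∀ i : Nat,
      d.values.filter (fun kv =>
          decide (((pvBrowserHeaderOrder.idxOf (PySem.Str.lower kv.1) : Nat) : Int) = (i : Int)))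
        = (d.items.filter (fun p => decide (List.idxOf p.1 pvBrowserHeaderOrder = i))).map (·.2) := by
    intro i
    have hv : d.values = d.items.map (·.2) := rfl
    rw [hv, List.filter_map]
    congr 1
    apply List.filter_congr
    intro q hq
    have hq1 := hinv q hq
    simp only [Function.comp]
    rw [← hq1]
    simp
  simp only [hgrp]
  rw [List.range_succ, List.flatMap_append, List.flatMap_singleton,
    assemble pvBrowserHeaderOrder pvOrder_nodup d.items hkeys]
  have hmk : PySem.Dict.mk d.items = d := rfl
  rw [hmk]
  congr 1
  have : (PySem.Dict.mk (d.items.filter (fun p => decide (p.1 ∉ pvBrowserHeaderOrder)))).values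
      = (d.items.filter (fun p => decide (p.1 ∉ pvBrowserHeaderOrder))).map (·.2) := rfl
  rw [this]
  congr 1
  apply List.filter_congr
  intro p _
  simp only [decide_eq_decide]
  exact (List.idxOf_eq_length_iff (a := p.1) (l := pvBrowserHeaderOrder)).symm
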